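-- pv_equiv track=rewrite | github.com/vedant-kokate/Project-Euler | 297.py | get_fibo_and_sum
-- ===== SOURCE A (Python) =====
-- def get_fibo_and_sum(n):
--     f = [1, 2]
--     fs = [1, 2]
--     while f[-1] < n:
--         cur = f[-1] + f[-2]
--         f.append(cur)
--         cur = fs[-1] + fs[-2] + f[-3] - 1
--         fs.append(cur)
--     return f, fs
-- ===== SOURCE B (Python) =====
-- def get_fibo_and_sum(n):
--     # Build the Fibonacci table (same stopping rule as the task demands).
--     f = [1, 2]
--     while f[-1] < n:
--         f.append(f[-1] + f[-2])
--     # Zeckendorf-sum array by closed form instead of the recurrence: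
--     # fs[i] = ((2i+2)*f[i] - (i+2)*f[i-1]) / 5 + 1  (exact division) for i >= 1.
--     fs = [1] + [((2 * i + 2) * f[i] - (i + 2) * f[i - 1]) // 5 + 1
--                 for i in range(1, len(f))]
--     return f, fs
-- ===== Notes on version B (the rewrite author's own statement) =====
-- stated objective: alternative
-- what changed: The fs recurrence fs[i]=fs[i-1]+fs[i-2]+f[i-3]-1 is eliminated entirely: B builds only the Fibonacci table with a loop and then computes each fs[i] directly by the closed form ((2i+2)*f[i] - (i+2)*f[i-1])//5 + 1 (exact division), proved equal to the recurrence by induction.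
import Mathlib
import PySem

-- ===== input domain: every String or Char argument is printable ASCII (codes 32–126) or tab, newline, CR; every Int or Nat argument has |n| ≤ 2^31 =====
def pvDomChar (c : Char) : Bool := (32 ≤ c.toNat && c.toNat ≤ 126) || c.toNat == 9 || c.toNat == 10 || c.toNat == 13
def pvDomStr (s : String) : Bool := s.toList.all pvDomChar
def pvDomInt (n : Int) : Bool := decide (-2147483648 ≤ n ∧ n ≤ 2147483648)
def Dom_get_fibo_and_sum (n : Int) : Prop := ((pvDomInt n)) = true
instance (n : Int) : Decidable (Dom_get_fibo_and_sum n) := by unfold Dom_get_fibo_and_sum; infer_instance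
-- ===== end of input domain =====

-- B replaces A's interleaved fs-recurrence by a closed form computed from the Fibonacci
-- table alone: fs[i] = ((2i+2)*f[i] - (i+2)*f[i-1])//5 + 1 (objective: alternative).

-- l[-1] / l[-2] / l[-3] of a Python list; exact for the nonempty lists both loops maintain.
def pvLast (l : List Int) : Int := l.getLast?.getD 0
def pvPen (l : List Int) : Int := l.dropLast.getLast?.getD 0
def pvPen2 (l : List Int) : Int := l.dropLast.dropLast.getLast?.getD 0

-- invariant of the f-list, carried only for termination of the while-loops
def pvInv (f : List Int) : Prop := 2 ≤ f.length ∧ 1 ≤ pvPen f ∧ pvPen f < pvLast f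

theorem pvLast_concat (l : List Int) (x : Int) : pvLast (l ++ [x]) = x := by
  simp [pvLast]

theorem pvPen_concat (l : List Int) (x : Int) : pvPen (l ++ [x]) = pvLast l := by
  simp [pvPen, pvLast]

theorem pvInv_step {f : List Int} (h : pvInv f) :
    pvInv (f ++ [pvLast f + pvPen f]) := by
  obtain ⟨hl, h1, h2⟩ := h
  refine ⟨by simp; omega, ?_, ?_⟩ <;>
    simp [pvPen_concat, pvLast_concat] <;> omega

theorem pvMeasure_step {n : Int} {f : List Int} (h : pvInv f) (hlt : pvLast f < n) :
    (n - pvLast (f ++ [pvLast f + pvPen f])).toNat < (n - pvLast f).toNat := by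
  obtain ⟨-, h1, h2⟩ := h
  rw [pvLast_concat]
  omega

-- ===== PORT A =====
-- A's while-loop over the joint state (f, fs); pvInv is only for termination.
def pvLoopA (n : Int) (f fs : List Int) (h : pvInv f) : List Int × List Int :=
  if hlt : pvLast f < n then
    pvLoopA n (f ++ [pvLast f + pvPen f])
      (fs ++ [pvLast fs + pvPen fs + pvPen2 (f ++ [pvLast f + pvPen f]) - 1])
      (pvInv_step h)
  else
    (f, fs)
termination_by (n - pvLast f).toNat
decreasing_by exact pvMeasure_step h hlt

def get_fibo_and_sum (n : Int) : List Int × List Int :=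
  pvLoopA n [1, 2] [1, 2] (by constructor <;> simp [pvPen, pvLast])

-- ===== PORT B =====
-- B's loop: build the Fibonacci table alone.
def pvLoopF (n : Int) (f : List Int) (h : pvInv f) : List Int :=
  if hlt : pvLast f < n then
    pvLoopF n (f ++ [pvLast f + pvPen f]) (pvInv_step h)
  else
    f
termination_by (n - pvLast f).toNat
decreasing_by exact pvMeasure_step h hlt

-- fs = [1] + [((2*i+2)*f[i] - (i+2)*f[i-1])//5 + 1 for i in range(1, len(f))]
-- (f[i] and f[i-1] are in range for these i, so pyGetD … 0 is exact)
def get_fibo_and_sum_alt (n : Int) : List Int × List Int :=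
  let F := pvLoopF n [1, 2] (by constructor <;> simp [pvPen, pvLast])
  (F, [1] ++ (PySem.List.pyRange 1 (F.length : Int) 1).map (fun i =>
      PySem.Int.floordiv
        ((2 * i + 2) * PySem.List.pyGetD F i 0 - (i + 2) * PySem.List.pyGetD F (i - 1) 0) 5 + 1))

-- ===== PRECONDITION & SPEC =====
def Spec_get_fibo_and_sum (n : Int) (out : List Int × List Int) : Prop := out = get_fibo_and_sum_alt n
instance (n : Int) (out : List Int × List Int) : Decidable (Spec_get_fibo_and_sum n out) := by unfold Spec_get_fibo_and_sum; infer_instance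

-- ===== CLAIM (what is proved, stated in full; the proofs are below) =====
def Claim_equal_get_fibo_and_sum : Prop := ∀ (n : Int), Dom_get_fibo_and_sum n → Spec_get_fibo_and_sum n (get_fibo_and_sum n)

-- ===== LEMMAS AND PROOFS =====

-- the Fibonacci sequence these lists hold
def fib : Nat → Int
  | 0 => 1
  | 1 => 2
  | (k+2) => fib (k+1) + fib k

-- numerator of the closed form at list index k+1, and the closed-form value
def pvN (k : Nat) : Int := (2 * k + 4) * fib (k + 1) - ((k : Int) + 3) * fib k
def pvG (k : Nat) : Int := PySem.Int.floordiv (pvN k) 5 + 1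

theorem fib_add_two (k : Nat) : fib (k + 2) = fib (k + 1) + fib k := rfl

theorem pvN_rec (k : Nat) : pvN (k + 2) = pvN (k + 1) + pvN k + 5 * fib (k + 1) := by
  unfold pvN
  rw [show k + 2 + 1 = (k + 1) + 2 from rfl, fib_add_two (k+1), fib_add_two k]
  push_cast
  ring

theorem pvN_dvd : ∀ k, 5 ∣ pvN k ∧ 5 ∣ pvN (k + 1) := by
  intro k
  induction k with
  | zero => exact ⟨⟨1, by decide⟩, ⟨2, by decide⟩⟩
  | succ k ih =>
      refine ⟨ih.2, ?_⟩
      rw [pvN_rec]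
      exact Dvd.dvd.add (Dvd.dvd.add ih.2 ih.1) ⟨fib (k+1), rfl⟩

theorem pvFloordiv_exact {a : Int} (h : 5 ∣ a) : PySem.Int.floordiv a 5 * 5 = a := by
  have hm : PySem.Int.mod a 5 = 0 := (PySem.Int.mod_eq_zero_iff_dvd a 5).2 h
  have := PySem.Int.floordiv_mul_add_mod a 5
  omega

theorem pvG_rec (k : Nat) : pvG (k + 2) = pvG (k + 1) + pvG k + fib (k + 1) - 1 := by
  unfold pvG
  have h0 := pvFloordiv_exact (pvN_dvd k).1
  have h1 := pvFloordiv_exact (pvN_dvd k).2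
  have h2 := pvFloordiv_exact (pvN_dvd (k + 1)).2
  have hr := pvN_rec k
  rw [show k + 1 + 1 = k + 2 from rfl] at h2
  omega

-- last / second-to-last of a range-map list
theorem pvLast_range_map (g : Nat → Int) (k : Nat) :
    pvLast ((List.range (k + 1)).map g) = g k := by
  rw [List.range_succ, List.map_append]
  exact pvLast_concat _ _

theorem pvPen_range_map (g : Nat → Int) (k : Nat) :
    pvPen ((List.range (k + 2)).map g) = g k := by
  have h : (List.range (k + 2)).map g = ((List.range (k + 1)).map g) ++ [g (k + 1)] := by
    rw [show k + 2 = (k + 1) + 1 from rfl, List.range_succ, List.map_append]; simp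
  rw [h, pvPen_concat]
  exact pvLast_range_map g k

-- B's first loop keeps the list a prefix of the Fibonacci sequence
theorem pvLoopF_fib (n : Int) (f : List Int) (h : pvInv f) :
    ∀ m : Nat, f = (List.range (m + 2)).map fib →
      ∃ M : Nat, pvLoopF n f h = (List.range (M + 2)).map fib := by
  fun_induction pvLoopF n f h with
  | case1 f h hlt ih =>
      intro m hm
      have hstep : f ++ [pvLast f + pvPen f] = (List.range (m + 3)).map fib := by
        subst hm
        rw [show m + 2 = (m + 1) + 1 from rfl, pvLast_range_map, pvPen_range_map]
        have h3 : (List.range (m + 3)).map fib = ((List.range (m + 2)).map fib) ++ [fib (m + 2)] := by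
          rw [show m + 3 = (m + 2) + 1 from rfl, List.range_succ, List.map_append]; simp
        rw [h3, fib_add_two]
      obtain ⟨M, hM⟩ := ih (m + 1) hstep
      exact ⟨M, hM⟩
  | case2 f h hlt =>
      intro m hm
      exact ⟨m, hm⟩

-- A's fs, rewritten as a fold over indices into the finished table (proof helper)
def pvFsFold (F : List Int) (fs : List Int) (lo hi : Int) : List Int :=
  (PySem.List.pyRange lo hi 1).foldl
    (fun fs i => fs ++ [pvLast fs + pvPen fs + (PySem.List.pyGet? F (i - 2)).getD 0 - 1]) fs

theorem pvPen2_concat (l : List Int) (x : Int) : pvPen2 (l ++ [x]) = pvPen l := by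
  simp [pvPen2, pvPen]

theorem pvLoopF_prefix (n : Int) (f : List Int) (h : pvInv f) :
    ∃ t, pvLoopF n f h = f ++ t := by
  fun_induction pvLoopF n f h with
  | case1 f h _ ih =>
      obtain ⟨t, ht⟩ := ih
      exact ⟨(pvLast f + pvPen f) :: t, by simp [ht]⟩
  | case2 f h _ => exact ⟨[], by simp⟩

-- pvPen f read as an index into any list extending f
theorem pvGet_prefix_pen (f t : List Int) (hl : 2 ≤ f.length) :
    (PySem.List.pyGet? (f ++ t) ((f.length : Int) - 2)).getD 0 = pvPen f := by
  have h2 : ((f.length : Int) - 2) = ((f.length - 2 : Nat) : Int) := by omega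
  rw [h2, PySem.List.pyGet?_natCast]
  have hlt : f.length - 2 < (f ++ t).length := by simp; omega
  simp only [List.getElem?_eq_getElem hlt]
  rw [List.getElem_append_left (by omega)]
  unfold pvPen
  rw [List.getLast?_eq_getElem?]
  have : f.dropLast.length - 1 = f.length - 2 := by simp; omega
  rw [this]
  have hd : f.length - 2 < f.dropLast.length := by simp; omega
  simp only [List.getElem?_eq_getElem hd, List.getElem_dropLast]

theorem pvLoopF_step (n : Int) (f : List Int) (h : pvInv f) (hlt : pvLast f < n) :
    pvLoopF n f h = pvLoopF n (f ++ [pvLast f + pvPen f]) (pvInv_step h) := by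
  conv_lhs => rw [pvLoopF]
  exact dif_pos hlt

theorem pvLoopF_stop (n : Int) (f : List Int) (h : pvInv f) (hlt : ¬ pvLast f < n) :
    pvLoopF n f h = f := by
  conv_lhs => rw [pvLoopF]
  exact dif_neg hlt

theorem pvLoopA_eq (n : Int) (f fs : List Int) (h : pvInv f) :
    pvLoopA n f fs h =
      (pvLoopF n f h, pvFsFold (pvLoopF n f h) fs (f.length) ((pvLoopF n f h).length)) := by
  fun_induction pvLoopA n f fs h with
  | case1 f fs h hlt ih =>
      rw [ih]
      rw [pvLoopF_step n f h hlt]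
      set f' := f ++ [pvLast f + pvPen f] with hf'
      set F := pvLoopF n f' (pvInv_step h) with hF
      obtain ⟨t, ht⟩ := pvLoopF_prefix n f' (pvInv_step h)
      refine Prod.ext rfl ?_
      have hlen : (f.length : Int) < (F.length : Int) := by
        rw [← hF] at ht
        have : F.length = f'.length + t.length := by rw [ht]; simp
        simp [this, hf']
        omega
      unfold pvFsFold
      rw [PySem.List.pyRange_one_cons hlen]
      simp only [List.foldl_cons]
      have hstep : (PySem.List.pyGet? F ((f.length : Int) - 2)).getD 0 = pvPen f := by
        have hFf : F = f ++ ((pvLast f + pvPen f) :: t) := by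
          rw [← hF] at ht; rw [ht, hf']; simp
        rw [hFf]; exact pvGet_prefix_pen f _ h.1
      rw [hstep]
      have hlen' : (f'.length : Int) = (f.length : Int) + 1 := by simp [hf']
      rw [hlen', pvPen2_concat]
  | case2 f fs h hlt =>
      rw [pvLoopF_stop n f h hlt]
      refine Prod.ext rfl ?_
      simp [pvFsFold, PySem.List.pyRange_one_eq_nil (le_refl (f.length : Int))]

-- reading the Fibonacci table by index
theorem pvGet_range_fib (M j : Nat) (hj : j < M) :
    (PySem.List.pyGet? ((List.range M).map fib) ((j : Nat) : Int)).getD 0 = fib j := by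
  rw [PySem.List.pyGet?_natCast]
  simp [hj]

-- the fold over the table produces exactly the closed-form list
theorem pvFsFold_fib (M : Nat) :
    ∀ j : Nat, j + 2 ≤ M →
      pvFsFold ((List.range M).map fib) [1, 2] 2 ((j + 2 : Nat) : Int)
        = 1 :: (List.range (j + 1)).map pvG := by
  intro j
  induction j with
  | zero =>
      intro _
      unfold pvFsFold
      rw [show ((0 + 2 : Nat) : Int) = 2 by norm_num,
          PySem.List.pyRange_one_eq_nil (by omega)]
      simp only [List.foldl_nil]
      have : pvG 0 = 2 := by decide
      simp [this]
  | succ j ih =>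
      intro hle
      have hrec := ih (by omega)
      unfold pvFsFold at hrec ⊢
      have hsplit : ((j + 1 + 2 : Nat) : Int) = ((j + 2 : Nat) : Int) + 1 := by push_cast; ring
      rw [hsplit, PySem.List.pyRange_one_succ_right (by push_cast; omega),
          List.foldl_append, hrec]
      simp only [List.foldl_cons, List.foldl_nil]
      have hidx : ((j + 2 : Nat) : Int) - 2 = ((j : Nat) : Int) := by push_cast; ring
      rw [hidx, pvGet_range_fib M j (by omega)]
      have hlast : pvLast (1 :: (List.range (j + 1)).map pvG) = pvG j := by
        have : (1 : Int) :: (List.range (j + 1)).map pvG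
            = (1 :: (List.range j).map pvG) ++ [pvG j] := by
          rw [List.range_succ, List.map_append]; simp
        rw [this, pvLast_concat]
      have hres : (1 : Int) :: (List.range (j + 1 + 1)).map pvG
          = (1 :: (List.range (j + 1)).map pvG) ++ [pvG (j + 1)] := by
        rw [List.range_succ (n := j + 1), List.map_append]; simp
      rw [hres, hlast]
      congr 2
      cases j with
      | zero =>
          have hpen : pvPen ((1 : Int) :: (List.range 1).map pvG) = 1 := by decide
          rw [hpen]
          decide
      | succ k =>
          have hpen : pvPen ((1 : Int) :: (List.range (k + 2)).map pvG) = pvG k := by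
            have : (1 : Int) :: (List.range (k + 2)).map pvG
                = (1 :: (List.range (k + 1)).map pvG) ++ [pvG (k + 1)] := by
              rw [List.range_succ (n := k + 1), List.map_append]; simp
            rw [this, pvPen_concat]
            have : (1 : Int) :: (List.range (k + 1)).map pvG
                = (1 :: (List.range k).map pvG) ++ [pvG k] := by
              rw [List.range_succ, List.map_append]; simp
            rw [this, pvLast_concat]
          rw [hpen, show k + 1 + 1 = k + 2 from rfl]
          have := pvG_rec k
          omega

-- B's comprehension over the table is the same closed-form list
theorem pvAltMap_fib (M : Nat) (h2 : 2 ≤ M) :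
    (PySem.List.pyRange 1 ((((List.range M).map fib).length : Nat) : Int) 1).map (fun i =>
        PySem.Int.floordiv
          ((2 * i + 2) * PySem.List.pyGetD ((List.range M).map fib) i 0
            - (i + 2) * PySem.List.pyGetD ((List.range M).map fib) (i - 1) 0) 5 + 1)
      = (List.range (M - 1)).map pvG := by
  rw [List.length_map, List.length_range]
  rw [PySem.List.pyRange_one]
  have hlen : (((M : Int)) - 1).toNat = M - 1 := by omega
  rw [hlen, List.map_map]
  refine List.map_congr_left ?_
  intro k hk
  rw [List.mem_range] at hk
  simp only [Function.comp]
  have hk1 : (1 : Int) + (k : Int) = ((k + 1 : Nat) : Int) := by push_cast; ring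
  have hget1 : PySem.List.pyGetD ((List.range M).map fib) (1 + (k : Int)) 0 = fib (k + 1) := by
    rw [hk1, PySem.List.pyGetD_natCast]
    simp [List.getD, Nat.lt_of_lt_of_le (by omega : k + 1 < M) (le_refl M)]
  have hget0 : PySem.List.pyGetD ((List.range M).map fib) (1 + (k : Int) - 1) 0 = fib k := by
    have : (1 : Int) + (k : Int) - 1 = ((k : Nat) : Int) := by push_cast; ring
    rw [this, PySem.List.pyGetD_natCast]
    simp [List.getD, (by omega : k < M)]
  rw [hget1, hget0]
  unfold pvG pvN
  congr 2
  push_cast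
  ring

-- ===== VERDICT (by name: the statement is the Claim_ definition above) =====
theorem get_fibo_and_sum_spec : Claim_equal_get_fibo_and_sum := by
  intro n _
  unfold Spec_get_fibo_and_sum get_fibo_and_sum get_fibo_and_sum_alt
  rw [pvLoopA_eq]
  obtain ⟨M, hM⟩ := pvLoopF_fib n [1, 2] (by constructor <;> simp [pvPen, pvLast]) 0 (by decide)
  simp only
  rw [hM]
  refine Prod.ext rfl ?_
  have hlen : ((((List.range (M + 2)).map fib).length : Nat) : Int) = ((M + 2 : Nat) : Int) := by
    simp
  have hA := pvFsFold_fib (M + 2) M (by omega)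
  have hB := pvAltMap_fib (M + 2) (by omega)
  rw [hB]
  have hlist2 : ([1, 2] : List Int).length = 2 := rfl
  rw [hlist2, show ((2 : Nat) : Int) = (2 : Int) from by norm_num]
  rw [show (((List.range (M + 2)).map fib).length : Int) = ((M + 2 : Nat) : Int) from hlen]
  rw [hA]
  simp [show M + 2 - 1 = M + 1 from rfl]
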